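-- pv_equiv track=rewrite | github.com/simonbuist/Pokemon-Colour-Picker | main.py | name_colour
-- ===== SOURCE A (Python) =====
-- def tuple_diff(tup1, tup2):
--     return abs(tup1[0] - tup2[0]) + abs(tup1[1] - tup2[1]) + abs(tup1[2] - tup2[2])
--
-- def name_colour(value):
--     # colour_dict = {
--     #     "red":(255, 0, 0), "orange":(255, 127, 0), "yellow":(255, 255, 0),
--     #     "green":(0, 255, 0), "blue":(0, 0, 255), "purple":(125, 0, 255),
--     #     "pink":(255, 0, 255), "brown":(165, 42, 42), "white":(255, 255, 255)
--     # }
--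
--     # dictionary of colour values - arrived on most of them by lowering the contrast
--     # on a rainbow gradient until the greyscale value was the same
--     equalized_dict = {
--         "red":(255, 74, 57), "orange":(255, 127, 0), "yellow":(155, 138, 0),
--         "green":(0, 220, 0), "blue":(110, 110, 255), "purple":(195, 69, 255),
--         "pink":(255, 35, 255), "brown":(100, 70, 36), "white":(255, 255, 255)
--     }
--
--     # empty dict of matching scores
--     match_dict = {}
--
--     # see how close each named colour is to the RGB value
--     for colour in equalized_dict.keys():
--         match_dict[colour] = tuple_diff(value, equalized_dict[colour])
--
--     # sort by closeness and return closest
--     match_list = list(sorted(match_dict.keys(), key=lambda val: match_dict[val]))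
--     return match_list[0]
-- ===== SOURCE B (Python) =====
-- def tuple_diff(tup1, tup2):
--     return abs(tup1[0] - tup2[0]) + abs(tup1[1] - tup2[1]) + abs(tup1[2] - tup2[2])
--
-- def name_colour(value):
--     equalized_dict = {
--         "red":(255, 74, 57), "orange":(255, 127, 0), "yellow":(155, 138, 0),
--         "green":(0, 220, 0), "blue":(110, 110, 255), "purple":(195, 69, 255),
--         "pink":(255, 35, 255), "brown":(100, 70, 36), "white":(255, 255, 255)
--     }
--     # single pass: keep the first colour with the smallest distance (strict <)
--     best_name = None
--     best_dist = None
--     for colour, rgb in equalized_dict.items():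
--         d = tuple_diff(value, rgb)
--         if best_dist is None or d < best_dist:
--             best_name, best_dist = colour, d
--     return best_name
-- ===== Notes on version B (the rewrite author's own statement) =====
-- stated objective: simpler
-- what changed: Replaces building a full distance dict and sorting all colour names by distance with a single pass over the colour table that tracks the running closest name (strict < keeps the first-seen minimum, matching stable sort's tie-break).
import Mathlib
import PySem

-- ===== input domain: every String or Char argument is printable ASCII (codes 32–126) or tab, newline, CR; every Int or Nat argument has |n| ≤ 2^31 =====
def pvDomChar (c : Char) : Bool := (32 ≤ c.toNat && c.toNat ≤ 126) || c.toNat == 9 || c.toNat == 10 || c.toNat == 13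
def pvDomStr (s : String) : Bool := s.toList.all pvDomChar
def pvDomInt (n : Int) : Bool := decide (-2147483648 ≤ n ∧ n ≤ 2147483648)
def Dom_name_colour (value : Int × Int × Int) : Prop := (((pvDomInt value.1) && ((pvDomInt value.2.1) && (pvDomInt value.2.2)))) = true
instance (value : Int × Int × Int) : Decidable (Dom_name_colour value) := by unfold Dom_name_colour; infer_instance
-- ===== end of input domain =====

-- B replaces A's distance-table-then-sort with one pass keeping the first closest name (same result; simpler).

-- ===== PORT A =====
def tuple_diff (tup1 tup2 : Int × Int × Int) : Int :=
  |tup1.1 - tup2.1| + |tup1.2.1 - tup2.2.1| + |tup1.2.2 - tup2.2.2|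

def pvEqualizedItems : List (String × (Int × Int × Int)) :=
  [("red", (255, 74, 57)), ("orange", (255, 127, 0)), ("yellow", (155, 138, 0)),
   ("green", (0, 220, 0)), ("blue", (110, 110, 255)), ("purple", (195, 69, 255)),
   ("pink", (255, 35, 255)), ("brown", (100, 70, 36)), ("white", (255, 255, 255))]

def name_colour (value : Int × Int × Int) : String :=
  let equalized : PySem.Dict String (Int × Int × Int) := PySem.Dict.ofList pvEqualizedItems
  -- for colour in equalized_dict.keys(): match_dict[colour] = tuple_diff(value, equalized_dict[colour])
  -- equalized_dict[colour]: the key is always present, so getD with a dummy default is exact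
  let matchDict : PySem.Dict String Int :=
    equalized.keys.foldl (fun d c => d.insert c (tuple_diff value (equalized.getD c (0, 0, 0)))) PySem.Dict.empty
  -- match_dict[val] inside the sort key: always present, getD is exact
  let matchList := PySem.List.sorted matchDict.keys (fun v => matchDict.getD v 0) false
  -- match_list[0]: the list always has 9 elements, so the .getD "" default is never used
  (PySem.List.pyGet? matchList 0).getD ""

-- ===== PORT B =====
def name_colour_alt (value : Int × Int × Int) : String :=
  -- single pass over the items, tracking (best_name, best_dist); None seed as in Source B
  let best := pvEqualizedItems.foldl
    (fun (best : Option (String × Int)) p =>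
      let d := tuple_diff value p.2
      match best with
      | none => some (p.1, d)
      | some (bn, bd) => if d < bd then some (p.1, d) else some (bn, bd))
    none
  -- the table is nonempty, so best is always some; the "" default is never used
  (best.map (·.1)).getD ""

-- ===== PRECONDITION & SPEC =====
def Spec_name_colour (value : Int × Int × Int) (out : String) : Prop := out = name_colour_alt value
instance (value : Int × Int × Int) (out : String) : Decidable (Spec_name_colour value out) := by unfold Spec_name_colour; infer_instance

-- ===== CLAIM (what is proved, stated in full; the proofs are below) =====
def Claim_equal_name_colour : Prop := ∀ (value : Int × Int × Int), Dom_name_colour value → Spec_name_colour value (name_colour value)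

-- ===== LEMMAS AND PROOFS =====

-- xs[0] on a list is its head (Python's l[0] for the always-nonempty match list)
theorem pyGet?_zero {α : Type} (l : List α) : PySem.List.pyGet? l 0 = l.head? := by
  cases l <;> simp [PySem.List.pyGet?, PySem.List.pyIdx?]

-- head of the stable insertion sort's foldl = running first-seen strict minimum
theorem head_foldl_insertBy {α κ : Type} [LT κ] [DecidableLT κ] (key : α → κ) :
    ∀ (xs : List α) (t : List α) (m : α),
      ((xs.foldl (fun a x => PySem.List.insertBy (fun a b => decide (key a < key b)) x a) (m :: t)).head?
        = some ((xs.foldl (fun (b : α × κ) x => if key x < b.2 then (x, key x) else b) (m, key m)).1)) := by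
  intro xs
  induction xs with
  | nil => intro t m; rfl
  | cons x xs ih =>
    intro t m
    simp only [List.foldl_cons, PySem.List.insertBy]
    by_cases h : key x < key m
    · simp only [h, decide_true, if_true]
      exact ih (m :: t) x
    · simp only [h, decide_false, if_false]
      exact ih _ m

-- head of A's sorted-by-dict-distance list, as a running first-seen strict minimum
theorem sortedHead (d : PySem.Dict String Int) (n : String) (ns : List String) :
    (PySem.List.sorted (n :: ns) (fun v => d.getD v 0) false).head?
      = some ((ns.foldl (fun (b : String × Int) x => if d.getD x 0 < b.2 then (x, d.getD x 0) else b)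
          (n, d.getD n 0)).1) := by
  rw [PySem.List.sorted_eq_foldl_insertBy, List.foldl_cons]
  exact head_foldl_insertBy (fun v => d.getD v 0) ns [] n

-- B's Option-seeded loop, once started, is the pair-accumulator loop
theorem foldl_opt_pair (value : Int × Int × Int) :
    ∀ (ps : List (String × (Int × Int × Int))) (b0 : String × Int),
      ps.foldl
        (fun (best : Option (String × Int)) p =>
          let d := tuple_diff value p.2
          match best with
          | none => some (p.1, d)
          | some (bn, bd) => if d < bd then some (p.1, d) else some (bn, bd))
        (some b0)
      = some (ps.foldl
          (fun (b : String × Int) p =>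
            if tuple_diff value p.2 < b.2 then (p.1, tuple_diff value p.2) else b) b0) := by
  intro ps
  induction ps with
  | nil => intro b0; rfl
  | cons p ps ih =>
    intro b0
    obtain ⟨bn, bd⟩ := b0
    simp only [List.foldl_cons]
    by_cases h : tuple_diff value p.2 < bd
    · simp only [h, if_true]; exact ih _
    · simp only [h, if_false]; exact ih _

-- B's loop on a nonempty list: first item seeds the pair accumulator
theorem foldl_opt_none (value : Int × Int × Int) (p : String × (Int × Int × Int))
    (ps : List (String × (Int × Int × Int))) :
    ((p :: ps).foldl
        (fun (best : Option (String × Int)) p =>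
          let d := tuple_diff value p.2
          match best with
          | none => some (p.1, d)
          | some (bn, bd) => if d < bd then some (p.1, d) else some (bn, bd))
        none)
      = some (ps.foldl
          (fun (b : String × Int) p =>
            if tuple_diff value p.2 < b.2 then (p.1, tuple_diff value p.2) else b)
          (p.1, tuple_diff value p.2)) := by
  rw [List.foldl_cons]
  exact foldl_opt_pair value ps _

-- ===== VERDICT (by name: the statement is the Claim_ definition above) =====
theorem name_colour_spec : Claim_equal_name_colour := by
  intro value _
  unfold Spec_name_colour name_colour name_colour_alt
  have hmd : (PySem.Dict.ofList pvEqualizedItems).keys.foldl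
      (fun d c => d.insert c (tuple_diff value ((PySem.Dict.ofList pvEqualizedItems).getD c (0, 0, 0))))
      PySem.Dict.empty
      = PySem.Dict.mk (pvEqualizedItems.map (fun p => (p.1, tuple_diff value p.2))) := by
    rfl
  simp only [hmd]
  simp only [pvEqualizedItems, PySem.Dict.keys_mk, List.map_cons, List.map_nil]
  rw [pyGet?_zero, sortedHead]
  rw [foldl_opt_none value]
  simp only [Option.map_some, Option.getD_some]
  simp only [List.foldl_cons, List.foldl_nil]
  simp [PySem.Dict.getD_eq_get?_getD, PySem.Dict.get?_mk_cons]
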